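-- pv_equiv track=rewrite | github.com/cokhoa21/Graduate-Research-2 | Cookie Pattern/cookie_pattern.py | find_common_url_params
-- ===== SOURCE A (Python) =====
-- def find_common_url_params(values):
--     """
--     Tìm các tham số chung trong các chuỗi URL encoded
--     """
--     # Parse các cặp key-value từ chuỗi
--     all_params = []
--     for v in values:
--         params = {}
--         try:
--             # Phân tích chuỗi URL-encoded một cách thủ công
--             parts = v.split('&')
--             for part in parts:
--                 if '=' in part:
--                     key, value = part.split('=', 1)
--                     params[key] = value
--         except:
--             continue
--         all_params.append(params)
--
--     if not all_params:
--         return None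
--
--     # Tìm các khóa chung trong tất cả các giá trị
--     common_keys = set(all_params[0].keys())
--     for params in all_params[1:]:
--         common_keys &= set(params.keys())
--
--     if not common_keys:
--         return None
--
--     # Tạo pattern với các khóa thông thường
--     common_keys = sorted(list(common_keys))
--     pattern_parts = []
--
--     for key in common_keys:
--         pattern_parts.append(f"{key}=[^&]+")
--
--     return "&".join(pattern_parts) + "(&[^&]+)*"
-- ===== SOURCE B (Python) =====
-- def find_common_url_params(values):
--     """
--     Single pass keeping a per-key occurrence count (and a total) instead of
--     building a list of per-string dicts and folding set intersections.
--     """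
--     counts = {}
--     total = 0
--     for v in values:
--         total += 1
--         seen = set()
--         for part in v.split('&'):
--             if '=' in part:
--                 seen.add(part.split('=', 1)[0])
--         for k in seen:
--             counts[k] = counts.get(k, 0) + 1
--     if total == 0:
--         return None
--     common = sorted(k for k, c in counts.items() if c == total)
--     if not common:
--         return None
--     return "&".join(f"{k}=[^&]+" for k in common) + "(&[^&]+)*"
-- ===== Notes on version B (the rewrite author's own statement) =====
-- stated objective: alternative
-- what changed: B makes one pass keeping a per-key occurrence counter plus a total of strings (common keys = keys whose count equals the total), instead of A's list of per-string dicts followed by a fold of set intersections; the dead try/except and the per-string value storage disappear.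
import Mathlib
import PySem

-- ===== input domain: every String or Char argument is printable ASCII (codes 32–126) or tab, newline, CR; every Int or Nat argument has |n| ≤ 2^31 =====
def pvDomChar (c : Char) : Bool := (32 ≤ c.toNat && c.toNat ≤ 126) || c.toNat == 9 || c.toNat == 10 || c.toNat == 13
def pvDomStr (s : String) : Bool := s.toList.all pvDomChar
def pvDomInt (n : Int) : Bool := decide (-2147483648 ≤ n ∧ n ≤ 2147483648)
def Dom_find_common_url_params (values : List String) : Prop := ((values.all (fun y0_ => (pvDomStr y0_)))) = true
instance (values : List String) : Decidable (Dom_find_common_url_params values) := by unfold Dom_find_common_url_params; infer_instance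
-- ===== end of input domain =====

-- B replaces A's list-of-dicts + set-intersection fold by a single pass with a per-key
-- occurrence counter and a total; same return value everywhere (objective: alternative).


-- ===== PORT A =====
-- per-string parse: build params dict from 'key=value' parts.  A's try/except is dead
-- code (str.split raises nothing), so it is ported without it; the `| _ => params` arm
-- of the match is unreachable ('=' in part guarantees split('=', 1) yields two pieces).
def pvParseA (v : String) : PySem.Dict String String :=
  ((PySem.Str.split? v "&").getD []).foldl
    (fun params part =>
      if PySem.Str.isIn "=" part then
        match PySem.Str.splitMax? part "=" 1 with
        | some [key, value] => params.insert key value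
        | _ => params
      else params)
    PySem.Dict.empty

-- all_params[0] / all_params[1:] are ported with headD / drop (the list is nonempty
-- in that branch, as the preceding emptiness test returned).
def find_common_url_params (values : List String) : Option String :=
  let all_params := values.foldl (fun acc v => acc ++ [pvParseA v]) []
  if all_params = [] then none
  else
    let common_keys := (all_params.drop 1).foldl
      (fun ck params => PySem.Set.inter ck (PySem.Set.ofList params.keys))
      (PySem.Set.ofList ((all_params.headD PySem.Dict.empty).keys))
    if common_keys = [] then none
    else
      let ck := PySem.List.sorted common_keys (fun x => x) false
      let pattern_parts := ck.foldl
        (fun acc key => acc ++ [String.ofList (key.toList ++ "=[^&]+".toList)]) []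
      some (String.ofList ((PySem.Str.join "&" pattern_parts).toList ++ "(&[^&]+)*".toList))

-- ===== PORT B =====
-- per-string key set; part.split('=', 1)[0] is ported with headD (the list is never empty)
def pvKeysB (v : String) : PySem.Set String :=
  ((PySem.Str.split? v "&").getD []).foldl
    (fun seen part =>
      if PySem.Str.isIn "=" part then
        PySem.Set.add seen (((PySem.Str.splitMax? part "=" 1).getD []).headD "")
      else seen)
    PySem.Set.empty

-- the counter dict is only filtered and sorted afterwards, so the result does not
-- depend on the iteration order of the per-string key set.
def find_common_url_params_alt (values : List String) : Option String :=
  let st := values.foldl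
    (fun (p : PySem.Dict String Int × Int) v =>
      ((pvKeysB v).foldl (fun d k => d.insert k (d.getD k 0 + 1)) p.1, p.2 + 1))
    (PySem.Dict.empty, (0 : Int))
  if st.2 = 0 then none
  else
    let common := PySem.List.sorted
      ((st.1.items.filter (fun q => q.2 == st.2)).map (·.1)) (fun x => x) false
    if common = [] then none
    else
      some (String.ofList ((PySem.Str.join "&"
        (common.map (fun k => String.ofList (k.toList ++ "=[^&]+".toList)))).toList
        ++ "(&[^&]+)*".toList))

-- ===== PRECONDITION & SPEC =====
def Spec_find_common_url_params (values : List String) (out : Option String) : Prop := out = find_common_url_params_alt values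
instance (values : List String) (out : Option String) : Decidable (Spec_find_common_url_params values out) := by unfold Spec_find_common_url_params; infer_instance

-- ===== CLAIM (what is proved, stated in full; the proofs are below) =====
def Claim_equal_find_common_url_params : Prop := ∀ (values : List String), Dom_find_common_url_params values → Spec_find_common_url_params values (find_common_url_params values)

-- ===== LEMMAS AND PROOFS =====

-- splitOnMax.go with maxsplit exhausted returns the rest as one piece
theorem pvGo0 (fuel : Nat) (l cur : List Char) (acc : List (List Char)) :
    PySem.Chars.splitOnMax.go ['='] fuel 0 l cur acc = ((cur.reverse ++ l) :: acc).reverse := by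
  match fuel, l with
  | 0, l => simp [PySem.Chars.splitOnMax.go]
  | fuel+1, [] => simp [PySem.Chars.splitOnMax.go]
  | fuel+1, c :: rest => simp [PySem.Chars.splitOnMax.go]

-- with maxsplit 1 and the separator present, go returns exactly two pieces
theorem pvGoPair (fuel : Nat) (l cur : List Char) (acc : List (List Char))
    (hm : '=' ∈ l) (hf : l.length < fuel) :
    ∃ a b, PySem.Chars.splitOnMax.go ['='] fuel 1 l cur acc =
      acc.reverse ++ [cur.reverse ++ a, b] := by
  induction fuel generalizing l cur acc with
  | zero => omega
  | succ fuel ih =>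
    match l, hm with
    | c :: rest, hm =>
      by_cases hc : c = '='
      · subst hc
        refine ⟨[], rest, ?_⟩
        simp [PySem.Chars.splitOnMax.go, List.isPrefixOf, pvGo0]
      · have hm' : '=' ∈ rest := by
          rcases List.mem_cons.mp hm with h | h
          · exact absurd h.symm hc
          · exact h
        obtain ⟨a, b, hab⟩ := ih rest (c :: cur) acc hm' (by simpa using Nat.lt_of_succ_lt_succ hf)
        refine ⟨c :: a, b, ?_⟩
        have hpre : (['='].isPrefixOf (c :: rest)) = false := by
          simp [List.isPrefixOf]
          exact fun h => hc h.symm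
        simp [PySem.Chars.splitOnMax.go, hpre, hab]

-- '=' in part  ⇒  part.split('=', 1) is exactly [a, b]
theorem pvSplitPair (part : String) (h : PySem.Str.isIn "=" part = true) :
    ∃ a b, PySem.Str.splitMax? part "=" 1 = some [a, b] := by
  have hmem : '=' ∈ part.toList := by
    have h2 := (PySem.Str.isIn_iff_infix (sub := "=") (s := part)).mp h
    simpa using h2.mem (by simp)
  obtain ⟨a, b, hab⟩ := pvGoPair (part.toList.length + 1) part.toList [] []
    hmem (Nat.lt_succ_self _)
  have hlen : part.toList.length = part.length := by simp
  rw [hlen] at hab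
  refine ⟨String.ofList a, String.ofList b, ?_⟩
  simp [PySem.Str.splitMax?, PySem.Chars.splitMax?, PySem.Chars.splitOnMax, hab]

-- the two per-string parse folds keep key-membership in lockstep
theorem pvKeysFold_mem (parts : List String) (d : PySem.Dict String String)
    (s : PySem.Set String) (k : String) (h : k ∈ d.keys ↔ k ∈ s) :
    (k ∈ (parts.foldl
        (fun params part =>
          if PySem.Str.isIn "=" part then
            match PySem.Str.splitMax? part "=" 1 with
            | some [key, value] => params.insert key value
            | _ => params
          else params) d).keys ↔
      k ∈ parts.foldl
        (fun seen part =>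
          if PySem.Str.isIn "=" part then
            PySem.Set.add seen (((PySem.Str.splitMax? part "=" 1).getD []).headD "")
          else seen) s) := by
  induction parts generalizing d s with
  | nil => simpa using h
  | cons part t ih =>
    by_cases hin : PySem.Str.isIn "=" part = true
    · obtain ⟨a, b, hab⟩ := pvSplitPair part hin
      simp only [List.foldl_cons, hin, if_pos, hab, Option.getD_some, List.headD_cons]
      exact ih _ _ (by
        rw [PySem.Dict.mem_keys_insert, PySem.Set.mem_add, h]; tauto)
    · simp only [List.foldl_cons, hin, if_neg, Bool.false_eq_true, not_false_iff]
      exact ih _ _ h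

-- A's parsed dict and B's key set have the same keys
theorem pvKeys_eq (v : String) (k : String) :
    k ∈ (pvParseA v).keys ↔ k ∈ pvKeysB v := by
  unfold pvParseA pvKeysB
  exact pvKeysFold_mem _ _ _ _ (by simp [PySem.Dict.keys_empty, PySem.Set.empty])

-- membership in A's intersection fold
theorem pvInter_mem (l : List (PySem.Dict String String)) (s : PySem.Set String) (k : String) :
    k ∈ l.foldl (fun ck params => PySem.Set.inter ck (PySem.Set.ofList params.keys)) s ↔
      k ∈ s ∧ ∀ p ∈ l, k ∈ p.keys := by
  induction l generalizing s with
  | nil => simp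
  | cons p t ih => simp [ih, PySem.Set.mem_inter, PySem.Set.mem_ofList]; tauto

theorem pvInter_nodup (l : List (PySem.Dict String String)) (s : PySem.Set String) (hs : s.Nodup) :
    (l.foldl (fun ck params => PySem.Set.inter ck (PySem.Set.ofList params.keys)) s).Nodup := by
  induction l generalizing s with
  | nil => exact hs
  | cons p t ih => exact ih _ (PySem.Set.nodup_inter _ _ hs)

-- B's per-string key set has no duplicates
theorem pvKeysB_nodup (v : String) : (pvKeysB v).Nodup := by
  unfold pvKeysB
  generalize (PySem.Str.split? v "&").getD [] = parts
  have h : ∀ (parts : List String) (s : PySem.Set String), s.Nodup →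
      (parts.foldl
        (fun seen part =>
          if PySem.Str.isIn "=" part then
            PySem.Set.add seen (((PySem.Str.splitMax? part "=" 1).getD []).headD "")
          else seen) s).Nodup := by
    intro parts
    induction parts with
    | nil => exact fun s hs => hs
    | cons part t ih =>
      intro s hs
      by_cases hin : PySem.Str.isIn "=" part = true <;>
        simp only [List.foldl_cons, hin, if_pos] <;> first
        | exact ih _ (PySem.Set.nodup_add _ _ hs)
        | simp only [Bool.false_eq_true, if_false]; exact ih _ hs
  exact h parts _ List.nodup_nil

-- the counter's value at k after the whole pass
theorem pvCount_getD (values : List String) (d : PySem.Dict String Int) (k : String) :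
    (values.foldl
      (fun d v => (pvKeysB v).foldl (fun d k => d.insert k (d.getD k 0 + 1)) d) d).getD k 0 =
      d.getD k 0 + (values.countP (fun v => decide (k ∈ pvKeysB v)) : Int) := by
  induction values generalizing d with
  | nil => simp
  | cons v t ih =>
    rw [List.foldl_cons, ih, PySem.Dict.getD_foldl_insert_add_one, List.countP_cons]
    by_cases hv : k ∈ pvKeysB v
    · rw [List.count_eq_one_of_mem (pvKeysB_nodup v) hv]
      simp [hv]; ring
    · rw [List.count_eq_zero_of_not_mem hv]
      simp [hv]

theorem pvCount_keys_nodup (values : List String) (d : PySem.Dict String Int) (h : d.keys.Nodup) :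
    (values.foldl
      (fun d v => (pvKeysB v).foldl (fun d k => d.insert k (d.getD k 0 + 1)) d) d).keys.Nodup := by
  induction values generalizing d with
  | nil => exact h
  | cons v t ih => exact ih _ (PySem.Dict.nodup_keys_foldl_insert _ _ _ h)

-- the pair fold is the counter fold together with a length count
theorem pvStPair (values : List String) (d : PySem.Dict String Int) (n : Int) :
    values.foldl
      (fun (p : PySem.Dict String Int × Int) v =>
        ((pvKeysB v).foldl (fun d k => d.insert k (d.getD k 0 + 1)) p.1, p.2 + 1)) (d, n) =
      (values.foldl
        (fun d v => (pvKeysB v).foldl (fun d k => d.insert k (d.getD k 0 + 1)) d) d,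
       n + values.length) := by
  induction values generalizing d n with
  | nil => simp
  | cons v t ih => rw [List.foldl_cons, List.foldl_cons, ih]; push_cast [List.length_cons]; ring_nf

-- ===== VERDICT (by name: the statement is the Claim_ definition above) =====
theorem find_common_url_params_spec : Claim_equal_find_common_url_params := by
  intro values _
  show find_common_url_params values = find_common_url_params_alt values
  simp only [find_common_url_params, find_common_url_params_alt]
  rw [PySem.List.foldl_append_singleton_eq_map, List.nil_append, pvStPair]
  cases values with
  | nil => simp
  | cons v0 vs =>
    have htot : (0 : Int) + ((v0 :: vs).length : Int) ≠ 0 := by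
      simp; omega
    rw [if_neg htot, List.map_cons,
      if_neg (by simp : ¬ (pvParseA v0 :: List.map pvParseA vs = [])),
      List.headD_cons, List.drop_succ_cons, List.drop_zero]
    set counts := (v0 :: vs).foldl
      (fun d v => (pvKeysB v).foldl (fun d k => d.insert k (d.getD k 0 + 1)) d)
      (PySem.Dict.empty : PySem.Dict String Int) with hcounts
    set LA := (vs.map pvParseA).foldl
      (fun ck params => PySem.Set.inter ck (PySem.Set.ofList params.keys))
      (PySem.Set.ofList (pvParseA v0).keys) with hLA
    set LB := (counts.items.filter
        (fun q => q.2 == (0 : Int) + ((v0 :: vs).length : Int))).map (·.1) with hLB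
    have hndk : counts.keys.Nodup := by
      rw [hcounts]
      exact pvCount_keys_nodup _ _ (by decide)
    have hAn : LA.Nodup := pvInter_nodup _ _ (PySem.Set.nodup_ofList _)
    have hBn : LB.Nodup := by
      have hsub : LB.Sublist counts.keys := by
        rw [hLB]
        simp only [PySem.Dict.keys]
        exact List.Sublist.map _ List.filter_sublist
      exact hndk.sublist hsub
    have hmem : ∀ k, k ∈ LA ↔ k ∈ LB := by
      intro k
      have hA : k ∈ LA ↔ ∀ v ∈ v0 :: vs, k ∈ pvKeysB v := by
        rw [hLA, pvInter_mem, PySem.Set.mem_ofList]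
        constructor
        · rintro ⟨h0, hrest⟩ v hv
          rcases List.mem_cons.mp hv with rfl | hv
          · exact (pvKeys_eq v k).mp h0
          · exact (pvKeys_eq v k).mp (hrest _ (List.mem_map_of_mem hv))
        · intro hall
          refine ⟨(pvKeys_eq v0 k).mpr (hall v0 (by simp)), ?_⟩
          intro p hp
          obtain ⟨v, hv, rfl⟩ := List.mem_map.mp hp
          exact (pvKeys_eq v k).mpr (hall v (by simp [hv]))
      have hB : k ∈ LB ↔ counts.get? k = some ((0 : Int) + ((v0 :: vs).length : Int)) := by
        rw [hLB]
        simp only [List.mem_map, List.mem_filter, beq_iff_eq]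
        constructor
        · rintro ⟨⟨k', c⟩, ⟨hmemi, hc⟩, rfl⟩
          have := PySem.Dict.get?_of_mem_items _ hmemi hndk
          simp at hc ⊢
          rw [this, hc]
        · intro hget
          exact ⟨(k, (0 : Int) + ((v0 :: vs).length : Int)),
            ⟨PySem.Dict.mem_items_of_get?_eq_some _ hget, by simp⟩, rfl⟩
      have hcnt : counts.getD k 0 =
          (((v0 :: vs).countP (fun v => decide (k ∈ pvKeysB v))) : Int) := by
        rw [hcounts, pvCount_getD]; simp
      rw [hA, hB]
      have hle := List.countP_le_length (p := fun v => decide (k ∈ pvKeysB v)) (l := v0 :: vs)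
      constructor
      · intro hall
        have : (v0 :: vs).countP (fun v => decide (k ∈ pvKeysB v)) = (v0 :: vs).length := by
          rw [List.countP_eq_length]
          intro v hv; simpa using hall v hv
        cases hget : counts.get? k with
        | none =>
          have h0 := PySem.Dict.getD_of_get?_eq_none _ (0 : Int) hget
          rw [h0] at hcnt
          have h1 : ((v0 :: vs).length : Int) = 0 := by rw [← this]; omega
          exact absurd h1 (by simp; omega)
        | some c =>
          have hc := PySem.Dict.getD_of_get?_eq_some _ (0 : Int) hget
          rw [hc] at hcnt
          rw [hcnt, this]
          simp
      · intro hget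
        have hc := PySem.Dict.getD_of_get?_eq_some _ (0 : Int) hget
        rw [hc] at hcnt
        have : (v0 :: vs).countP (fun v => decide (k ∈ pvKeysB v)) = (v0 :: vs).length := by
          have := hcnt.symm
          simp at this
          omega
        intro v hv
        have := (List.countP_eq_length).mp this v hv
        simpa using this
    have hperm : LA.Perm LB := (List.perm_ext_iff_of_nodup hAn hBn).mpr hmem
    have hsorted : PySem.List.sorted LA (fun x => x) false =
        PySem.List.sorted LB (fun x => x) false :=
      PySem.List.sorted_eq_sorted_of_perm _ _ _ (fun _ _ h => h) hperm
    by_cases hE : LA = []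
    · rw [if_pos hE]
      have : PySem.List.sorted LB (fun x => x) false = [] := by
        rw [← hsorted, hE]; simp [PySem.List.sorted_eq_nil_iff]
      rw [if_pos this]
    · rw [if_neg hE]
      have hSne : PySem.List.sorted LB (fun x => x) false ≠ [] := by
        rw [← hsorted]
        simp [PySem.List.sorted_eq_nil_iff, hE]
      rw [if_neg hSne, ← hsorted]
      rw [PySem.List.foldl_append_singleton_eq_map, List.nil_append]
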